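-- pv_equiv track=rewrite | github.com/bobbomania/RedditBombo | RedditScraper.py | censorWord
-- ===== SOURCE A (Python) =====
-- def censorWord(word):
--
--     censoredWord = ""
--
--     vowelsCounted = 0
--     for chr in word:
--         if (chr in "aeiou"):
--             vowelsCounted += 1
--
--             #every odd vowel
--             if (vowelsCounted%2):
--                 censoredWord += "*"
--                 continue
--
--         censoredWord += chr
--
--     return censoredWord
-- ===== SOURCE B (Python) =====
-- def censorWord(word):
--     # pass 1: collect the indices of all vowels, then keep the 1st, 3rd, 5th, ...
--     vowel_positions = [i for i, c in enumerate(word) if c in "aeiou"]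
--     censored = set(vowel_positions[0::2])
--     # pass 2: rebuild the string, starring exactly the selected positions
--     return ''.join('*' if i in censored else c for i, c in enumerate(word))
-- ===== Notes on version B (the rewrite author's own statement) =====
-- stated objective: alternative
-- what changed: Replaces the single fused loop with a running vowel counter by two separate passes: first collect vowel indices and slice every other one into a set, then rebuild the string position-by-position from that set.
import Mathlib
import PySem

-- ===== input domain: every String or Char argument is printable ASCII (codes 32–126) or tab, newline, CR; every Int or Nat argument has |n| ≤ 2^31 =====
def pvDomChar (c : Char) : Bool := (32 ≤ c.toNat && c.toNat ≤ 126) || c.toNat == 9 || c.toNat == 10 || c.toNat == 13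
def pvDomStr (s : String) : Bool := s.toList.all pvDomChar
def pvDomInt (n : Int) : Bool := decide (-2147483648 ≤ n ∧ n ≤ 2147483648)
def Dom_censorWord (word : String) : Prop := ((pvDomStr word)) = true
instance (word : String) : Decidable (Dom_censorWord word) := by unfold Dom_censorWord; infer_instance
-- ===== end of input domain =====

-- B replaces A's fused counter loop by two distinct passes (collect vowel indices, keep every other one in a set, rebuild by position); alternative decomposition, same values.


-- ===== PORT A =====
-- 'chr in "aeiou"' with chr a single character: character-membership test (exact here)
def pvIsVowel (c : Char) : Bool := "aeiou".toList.contains c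

-- A's for-loop as structural recursion over the characters, carrying the running vowel counter
def censorWordLoopA : List Char → Nat → List Char
  | [], _ => []
  | c :: rest, cnt =>
    if pvIsVowel c then
      if (cnt + 1) % 2 = 1 then '*' :: censorWordLoopA rest (cnt + 1)
      else c :: censorWordLoopA rest (cnt + 1)
    else c :: censorWordLoopA rest cnt

def censorWord (word : String) : String := String.ofList (censorWordLoopA word.toList 0)

-- ===== PORT B =====
-- hand-port of the slice vowel_positions[0::2] (indices 0, 2, 4, ...; exact for this slice)
def everyOther : List Int → List Int
  | [] => []
  | [x] => [x]
  | x :: _ :: rest => x :: everyOther rest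

def censorWord_alt (word : String) : String :=
  let vowelPositions : List Int :=
    (PySem.List.enumerate word.toList 0).filterMap
      (fun p => if pvIsVowel p.2 then some p.1 else none)
  let censored : PySem.Set Int := PySem.Set.ofList (everyOther vowelPositions)
  String.ofList ((PySem.List.enumerate word.toList 0).map
    (fun p => if PySem.Set.contains censored p.1 then '*' else p.2))

-- ===== PRECONDITION & SPEC =====
def Spec_censorWord (word : String) (out : String) : Prop := out = censorWord_alt word
instance (word : String) (out : String) : Decidable (Spec_censorWord word out) := by unfold Spec_censorWord; infer_instance

-- ===== CLAIM (what is proved, stated in full; the proofs are below) =====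
def Claim_equal_censorWord : Prop := ∀ (word : String), Dom_censorWord word → Spec_censorWord word (censorWord word)

-- ===== LEMMAS AND PROOFS =====

-- the vowel-index list of cs when enumeration starts at k (B's first pass, generalized)
def vp (cs : List Char) (k : Int) : List Int :=
  (PySem.List.enumerate cs k).filterMap (fun p => if pvIsVowel p.2 then some p.1 else none)

-- which vowel positions are censored, given the parity of A's counter so far
def sel (evenCnt : Bool) (l : List Int) : List Int :=
  if evenCnt then everyOther l else everyOther (l.drop 1)

lemma everyOther_subset (l : List Int) : everyOther l ⊆ l := by
  induction l using everyOther.induct with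
  | case1 => simp [everyOther]
  | case2 x => simp [everyOther]
  | case3 x y rest ih =>
      intro a ha
      simp only [everyOther, List.mem_cons] at ha ⊢
      rcases ha with h | h
      · exact Or.inl h
      · exact Or.inr (Or.inr (ih h))

lemma everyOther_cons (x : Int) (l : List Int) :
    everyOther (x :: l) = x :: everyOther (l.drop 1) := by
  cases l <;> simp [everyOther]

lemma vp_cons (c : Char) (rest : List Char) (k : Int) :
    vp (c :: rest) k =
      if pvIsVowel c then k :: vp rest (k + 1) else vp rest (k + 1) := by
  unfold vp
  rw [PySem.List.enumerate_cons, List.filterMap_cons]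
  by_cases h : pvIsVowel c <;> simp [h]

lemma vp_lb {cs : List Char} {k x : Int} (h : x ∈ vp cs k) : k ≤ x := by
  unfold vp at h
  rcases List.mem_filterMap.mp h with ⟨p, hp, hx⟩
  rcases (PySem.List.mem_enumerate_iff _ _ _).mp hp with ⟨j, hj, rfl⟩
  split at hx
  · cases hx; omega
  · cases hx

lemma sel_subset (b : Bool) (l : List Int) : sel b l ⊆ l := by
  cases b
  · exact fun x hx => (List.drop_subset 1 l) (everyOther_subset _ hx)
  · exact everyOther_subset l

lemma not_mem_sel (b : Bool) (rest : List Char) (k : Int) : ¬ (k ∈ sel b (vp rest (k+1))) := by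
  intro h
  have := vp_lb (sel_subset _ _ h)
  omega

lemma map_cons_set (rest : List Char) (k : Int) (S : List Int) :
    (PySem.List.enumerate rest (k+1)).map (fun p => if (k :: S).contains p.1 then '*' else p.2)
    = (PySem.List.enumerate rest (k+1)).map (fun p => if S.contains p.1 then '*' else p.2) := by
  apply List.map_congr_left
  intro p hp
  rcases (PySem.List.mem_enumerate_iff _ _ _).mp hp with ⟨j, hj, rfl⟩
  have : ¬ ((k + 1 + (j:Int)) = k) := by omega
  simp [this]

-- A's loop computes exactly B's position-driven rebuild, for any start index and counter
lemma main_lemma (cs : List Char) (k : Int) (cnt : Nat) :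
    censorWordLoopA cs cnt =
      (PySem.List.enumerate cs k).map
        (fun p => if (sel (cnt % 2 == 0) (vp cs k)).contains p.1 then '*' else p.2) := by
  induction cs generalizing k cnt with
  | nil => simp [censorWordLoopA, PySem.List.enumerate_nil]
  | cons c rest ih =>
    rw [PySem.List.enumerate_cons, List.map_cons, vp_cons]
    by_cases hv : pvIsVowel c
    · simp only [hv, if_pos]
      by_cases he : cnt % 2 = 0
      · -- counter even: this vowel is censored
        have h1 : (cnt + 1) % 2 = 1 := by omega
        have h2 : ¬ ((cnt + 1) % 2 = 0) := by omega
        rw [show censorWordLoopA (c :: rest) cnt = '*' :: censorWordLoopA rest (cnt+1) by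
          simp [censorWordLoopA, hv, h1]]
        have hsel : sel (cnt % 2 == 0) (k :: vp rest (k+1))
            = k :: everyOther ((vp rest (k+1)).drop 1) := by
          simp [sel, he, everyOther_cons]
        rw [hsel]
        have hsel2 : sel ((cnt+1) % 2 == 0) (vp rest (k+1)) = everyOther ((vp rest (k+1)).drop 1) := by
          simp [sel, h2]
        rw [ih (k+1) (cnt+1), hsel2, map_cons_set]
        simp
      · -- counter odd: this vowel is kept
        have h1 : ¬ ((cnt + 1) % 2 = 1) := by omega
        have h2 : (cnt + 1) % 2 = 0 := by omega
        rw [show censorWordLoopA (c :: rest) cnt = c :: censorWordLoopA rest (cnt+1) by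
          simp [censorWordLoopA, hv, h1]]
        have hsel : sel (cnt % 2 == 0) (k :: vp rest (k+1)) = everyOther (vp rest (k+1)) := by
          simp [sel, he]
        rw [hsel]
        have hsel2 : sel ((cnt+1) % 2 == 0) (vp rest (k+1)) = everyOther (vp rest (k+1)) := by
          simp [sel, h2]
        rw [ih (k+1) (cnt+1), hsel2]
        simp only [List.contains_iff_mem]
        have hk : ¬ k ∈ everyOther (vp rest (k+1)) := by
          simpa [sel] using not_mem_sel true rest k
        simp [hk]
    · simp only [hv, Bool.false_eq_true, if_false]
      rw [show censorWordLoopA (c :: rest) cnt = c :: censorWordLoopA rest cnt by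
        simp [censorWordLoopA, hv]]
      rw [ih (k+1) cnt]
      simp only [List.contains_iff_mem]
      simp [not_mem_sel (cnt % 2 == 0) rest k]

lemma censorWord_eq_alt (word : String) : censorWord word = censorWord_alt word := by
  unfold censorWord censorWord_alt
  rw [main_lemma word.toList 0 0]
  congr 1
  apply List.map_congr_left
  intro p hp
  have hb : (sel (0 % 2 == 0) (vp word.toList 0)).contains p.1
      = PySem.Set.contains (PySem.Set.ofList (everyOther (vp word.toList 0))) p.1 := by
    rw [Bool.eq_iff_iff]
    simp [sel, PySem.Set.mem_ofList]
  rw [show (0:Int) = ((0:Nat):Int) by norm_num] at hb ⊢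
  simp only [vp] at hb ⊢
  split_ifs with h1 h2 h2 <;> first | rfl | (exact absurd (hb ▸ h1) h2) | (exact absurd (hb.symm ▸ h2) h1)

-- ===== VERDICT (by name: the statement is the Claim_ definition above) =====
theorem censorWord_spec : Claim_equal_censorWord := by
  intro word _
  unfold Spec_censorWord
  exact censorWord_eq_alt word
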